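-- pv_equiv track=rewrite | github.com/Nikhil18207/Work-1 | backend/engines/intelligent_search_engine.py | _extract_product
-- ===== SOURCE A (Python) =====
-- def _extract_product(query: str) -> str:
--     """Extract product/commodity from query"""
--     # Common product patterns
--     product_keywords = [
--         'rice bran oil', 'vegetable oil', 'palm oil', 'sunflower oil',
--         'soybean oil', 'canola oil', 'olive oil', 'coconut oil',
--         'corn oil', 'peanut oil', 'sesame oil', 'mustard oil',
--         'oil', 'grain', 'wheat', 'rice', 'corn', 'soybean',
--         'spices', 'sugar', 'salt', 'flour'
--     ]
--
--     query_lower = query.lower()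
--     for product in sorted(product_keywords, key=len, reverse=True):
--         if product in query_lower:
--             return product.title()
--
--     # If no specific product found, try to extract noun phrases
--     words = query.split()
--     for i, word in enumerate(words):
--         if word.lower() in ['of', 'for']:
--             if i + 1 < len(words):
--                 # Take next 1-3 words as product
--                 product_words = words[i+1:min(i+4, len(words))]
--                 # Stop at prepositions
--                 stop_words = ['in', 'at', 'from', 'to', 'for']
--                 product_words = [w for w in product_words if w.lower() not in stop_words]
--                 if product_words:
--                     return ' '.join(product_words)
--
--     return 'Product'
-- ===== SOURCE B (Python) =====
-- def _extract_product(query: str) -> str: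
--     """Extract product/commodity from query"""
--     product_keywords = [
--         'rice bran oil', 'vegetable oil', 'palm oil', 'sunflower oil',
--         'soybean oil', 'canola oil', 'olive oil', 'coconut oil',
--         'corn oil', 'peanut oil', 'sesame oil', 'mustard oil',
--         'oil', 'grain', 'wheat', 'rice', 'corn', 'soybean',
--         'spices', 'sugar', 'salt', 'flour'
--     ]
--
--     query_lower = query.lower()
--
--     # One pass over the keywords in declared order, keeping the longest match.
--     # Strict '>' keeps the earliest-declared keyword on equal lengths, which is
--     # exactly what the stable length-descending sort + first-match gives.
--     best = None
--     for product in product_keywords: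
--         if product in query_lower and (best is None or len(product) > len(best)):
--             best = product
--     if best is not None:
--         return best.title()
--
--     # Noun-phrase fallback: walk the word list by suffixes instead of indices.
--     rest = query.split()
--     while rest:
--         word, rest = rest[0], rest[1:]
--         if word.lower() in ('of', 'for') and rest:
--             product_words = [w for w in rest[:3]
--                              if w.lower() not in ('in', 'at', 'from', 'to', 'for')]
--             if product_words:
--                 return ' '.join(product_words)
--
--     return 'Product'
-- ===== Notes on version B (the rewrite author's own statement) =====
-- stated objective: simpler
-- what changed: Phase 1 no longer sorts the keyword list: a single pass keeps the longest matching keyword (strict '>' preserves the stable sort's tie-break), and the noun-phrase fallback walks word suffixes instead of enumerate indices and slicing.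
import Mathlib
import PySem

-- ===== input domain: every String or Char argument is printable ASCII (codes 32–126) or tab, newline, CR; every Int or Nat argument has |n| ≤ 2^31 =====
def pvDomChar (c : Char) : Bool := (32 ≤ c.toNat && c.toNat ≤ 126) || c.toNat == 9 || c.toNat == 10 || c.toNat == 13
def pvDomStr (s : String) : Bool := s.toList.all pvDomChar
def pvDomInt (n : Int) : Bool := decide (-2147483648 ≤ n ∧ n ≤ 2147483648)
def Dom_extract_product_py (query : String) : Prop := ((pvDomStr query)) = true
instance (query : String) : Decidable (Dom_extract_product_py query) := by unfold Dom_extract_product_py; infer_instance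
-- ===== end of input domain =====

-- B replaces phase 1's sort-then-first-match by a single longest-so-far pass over the
-- declared keyword order, and walks word suffixes instead of enumerate+slice in phase 2:
-- a simpler decomposition with the same return value.

-- shared helpers (identical literals / builtins in both Pythons)
def pvKeywords : List String :=
  ["rice bran oil", "vegetable oil", "palm oil", "sunflower oil",
   "soybean oil", "canola oil", "olive oil", "coconut oil",
   "corn oil", "peanut oil", "sesame oil", "mustard oil",
   "oil", "grain", "wheat", "rice", "corn", "soybean",
   "spices", "sugar", "salt", "flour"]

def pvStop : List String := ["in", "at", "from", "to", "for"]

-- hand port of str.title (PySem has none): exact on ASCII, where 'cased' = alpha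
def pvTitleGo : List Char → Bool → List Char
  | [], _ => []
  | c :: cs, prev =>
    if PySem.Chars.isalpha c then
      (if prev then PySem.Chars.lowerChar c else PySem.Chars.upperChar c) :: pvTitleGo cs true
    else c :: pvTitleGo cs false

def pvTitle (s : String) : String := String.ofList (pvTitleGo s.toList false)

-- ===== PORT A =====
-- 'for product in sorted(…): if product in query_lower: return product.title()'
def pvLoopA : List String → String → Option String
  | [], _ => none
  | p :: rest, ql => if PySem.Str.isIn p ql then some p else pvLoopA rest ql

-- 'for i, word in enumerate(words): …' with slice words[i+1:min(i+4,len(words))]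
def pvLoopA2 (words : List String) : List (Int × String) → Option String
  | [] => none
  | (i, w) :: rest =>
    if (["of", "for"] : List String).contains (PySem.Str.lower w) then
      if i + 1 < (words.length : Int) then
        let pw := PySem.List.slice words (some (i + 1)) (some (min (i + 4) (words.length : Int)))
        let pw := pw.filter (fun v => !(pvStop.contains (PySem.Str.lower v)))
        if pw.isEmpty then pvLoopA2 words rest else some (PySem.Str.join " " pw)
      else pvLoopA2 words rest
    else pvLoopA2 words rest

def extract_product_py (query : String) : String :=
  let ql := PySem.Str.lower query
  match pvLoopA (PySem.List.sorted pvKeywords PySem.Str.len true) ql with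
  | some p => pvTitle p
  | none =>
    let words := PySem.Str.split₀ query
    match pvLoopA2 words (PySem.List.enumerate words) with
    | some r => r
    | none => "Product"

-- ===== PORT B =====
-- single pass keeping the longest matching keyword ('best' accumulator, strict '>')
def pvLoopB : List String → String → Option String → Option String
  | [], _, best => best
  | p :: rest, ql, best =>
    pvLoopB rest ql
      (if PySem.Str.isIn p ql &&
          (match best with | none => true | some b => decide (PySem.Str.len b < PySem.Str.len p))
       then some p else best)

-- 'while rest: word, rest = rest[0], rest[1:] …' — suffix walk, take 3
def pvLoopB2 : List String → Option String
  | [] => none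
  | w :: rest =>
    if (["of", "for"] : List String).contains (PySem.Str.lower w) && !rest.isEmpty then
      let pw := (rest.take 3).filter (fun v => !(pvStop.contains (PySem.Str.lower v)))
      if pw.isEmpty then pvLoopB2 rest else some (PySem.Str.join " " pw)
    else pvLoopB2 rest

def extract_product_py_alt (query : String) : String :=
  let ql := PySem.Str.lower query
  match pvLoopB pvKeywords ql none with
  | some p => pvTitle p
  | none =>
    match pvLoopB2 (PySem.Str.split₀ query) with
    | some r => r
    | none => "Product"

-- ===== PRECONDITION & SPEC =====
def Spec_extract_product_py (query : String) (out : String) : Prop := out = extract_product_py_alt query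
instance (query : String) (out : String) : Decidable (Spec_extract_product_py query out) := by unfold Spec_extract_product_py; infer_instance

-- ===== CLAIM (what is proved, stated in full; the proofs are below) =====
def Claim_equal_extract_product_py : Prop := ∀ (query : String), Dom_extract_product_py query → Spec_extract_product_py query (extract_product_py query)

-- ===== LEMMAS AND PROOFS =====

-- 'first match of maximal length' machinery
def pvAtom (P : String → Bool) (x : String) : Option String := if P x then some x else none

def pvComb : Option String → Option String → Option String
  | a, none => a
  | none, some b => some b
  | some a, some b => if PySem.Str.len a < PySem.Str.len b then some b else some a

def pvPick (P : String → Bool) : List String → Option String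
  | [] => none
  | x :: l => pvComb (pvAtom P x) (pvPick P l)

theorem pvComb_none_left (b : Option String) : pvComb none b = b := by cases b <;> rfl

theorem pvComb_none_right (a : Option String) : pvComb a none = a := rfl

theorem pvComb_some_some (a b : String) :
    pvComb (some a) (some b)
      = if PySem.Str.len a < PySem.Str.len b then some b else some a := rfl

theorem pvAtom_pos {P : String → Bool} {x : String} (h : P x = true) : pvAtom P x = some x := by
  simp [pvAtom, h]

theorem pvAtom_neg {P : String → Bool} {x : String} (h : P x = false) : pvAtom P x = none := by
  simp [pvAtom, h]

theorem pvComb_assoc (a b c : Option String) :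
    pvComb (pvComb a b) c = pvComb a (pvComb b c) := by
  cases a with
  | none => rw [pvComb_none_left, pvComb_none_left]
  | some x =>
    cases b with
    | none => rw [pvComb_none_right, pvComb_none_left]
    | some y =>
      cases c with
      | none => rw [pvComb_none_right, pvComb_none_right]
      | some z =>
        rw [pvComb_some_some, pvComb_some_some]
        by_cases h1 : PySem.Str.len x < PySem.Str.len y <;>
          by_cases h2 : PySem.Str.len y < PySem.Str.len z <;>
          simp only [if_pos, if_neg, h1, h2, if_false, pvComb_some_some] <;>
          split_ifs <;> first | rfl | (exfalso; omega)

theorem pvAtom_comm (P : String → Bool) (x y : String)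
    (h : PySem.Str.len x ≠ PySem.Str.len y) :
    pvComb (pvAtom P x) (pvAtom P y) = pvComb (pvAtom P y) (pvAtom P x) := by
  cases hx : P x <;> cases hy : P y
  · rw [pvAtom_neg hx, pvAtom_neg hy]
  · rw [pvAtom_neg hx, pvAtom_pos hy, pvComb_none_left, pvComb_none_right]
  · rw [pvAtom_pos hx, pvAtom_neg hy, pvComb_none_left, pvComb_none_right]
  · rw [pvAtom_pos hx, pvAtom_pos hy, pvComb_some_some, pvComb_some_some]
    split_ifs <;> first | rfl | (exfalso; omega)

-- stable insertion sort by length, descending (proof-side mirror of Python's sorted)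
def pvInsert (x : String) : List String → List String
  | [] => [x]
  | y :: l => if PySem.Str.len y ≤ PySem.Str.len x then x :: y :: l else y :: pvInsert x l

def pvSort : List String → List String
  | [] => []
  | x :: l => pvInsert x (pvSort l)

theorem pvPick_insert (P : String → Bool) (x : String) (m : List String) :
    pvPick P (pvInsert x m) = pvComb (pvAtom P x) (pvPick P m) := by
  induction m with
  | nil => rfl
  | cons y m' ih =>
    by_cases h : PySem.Str.len y ≤ PySem.Str.len x
    · simp only [pvInsert, if_pos h, pvPick]
    · have hne : PySem.Str.len x ≠ PySem.Str.len y := by omega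
      simp only [pvInsert, if_neg h, pvPick, ih,
        ← pvComb_assoc, pvAtom_comm P x y hne]

theorem pvPick_sort (P : String → Bool) (l : List String) :
    pvPick P (pvSort l) = pvPick P l := by
  induction l with
  | nil => rfl
  | cons x l ih => simp only [pvSort, pvPick_insert, ih, pvPick]

theorem pvPick_mem (P : String → Bool) (l : List String) (b : String)
    (h : pvPick P l = some b) : b ∈ l := by
  induction l with
  | nil => simp [pvPick] at h
  | cons x l ih =>
    simp only [pvPick] at h
    cases hx : P x with
    | false =>
      rw [pvAtom_neg hx, pvComb_none_left] at h
      exact List.mem_cons_of_mem _ (ih h)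
    | true =>
      rw [pvAtom_pos hx] at h
      cases hp : pvPick P l with
      | none =>
        rw [hp, pvComb_none_right] at h
        cases Option.some.inj h
        exact List.mem_cons_self
      | some c =>
        rw [hp, pvComb_some_some] at h
        split_ifs at h
        · cases Option.some.inj h
          exact List.mem_cons_of_mem _ (ih hp)
        · cases Option.some.inj h
          exact List.mem_cons_self

theorem pvLoopB_eq (l : List String) (ql : String) :
    ∀ best, pvLoopB l ql best = pvComb best (pvPick (fun p => PySem.Str.isIn p ql) l) := by
  induction l with
  | nil => intro best; cases best <;> rfl
  | cons p l ih =>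
    intro best
    have hstep :
        (if PySem.Str.isIn p ql &&
            (match best with | none => true | some b => decide (PySem.Str.len b < PySem.Str.len p))
         then some p else best)
        = pvComb best (pvAtom (fun q => PySem.Str.isIn q ql) p) := by
      cases best with
      | none =>
        cases hx : PySem.Str.isIn p ql with
        | false =>
          rw [pvAtom_neg (P := fun q => PySem.Str.isIn q ql) (x := p) hx,
            pvComb_none_right]; rfl
        | true =>
          rw [pvAtom_pos (P := fun q => PySem.Str.isIn q ql) (x := p) hx,
            pvComb_none_left]; rfl
      | some b =>
        cases hx : PySem.Str.isIn p ql with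
        | false =>
          rw [pvAtom_neg (P := fun q => PySem.Str.isIn q ql) (x := p) hx,
            pvComb_none_right]; rfl
        | true =>
          rw [pvAtom_pos (P := fun q => PySem.Str.isIn q ql) (x := p) hx,
            pvComb_some_some]
          have hred : (match (some b : Option String) with
              | none => true
              | some c => decide (PySem.Str.len c < PySem.Str.len p))
              = decide (PySem.Str.len b < PySem.Str.len p) := rfl
          by_cases hl : PySem.Str.len b < PySem.Str.len p
          · rw [Bool.true_and, hred, decide_eq_true hl, if_pos hl]; rfl
          · rw [Bool.true_and, hred, decide_eq_false hl, if_neg hl]; rfl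
    simp only [pvLoopB, ih, hstep, pvComb_assoc, pvPick]

theorem pvLoopA_eq_pick (ql : String) (m : List String)
    (h : m.Pairwise (fun a b => PySem.Str.len b ≤ PySem.Str.len a)) :
    pvLoopA m ql = pvPick (fun p => PySem.Str.isIn p ql) m := by
  induction m with
  | nil => rfl
  | cons x m' ih =>
    rcases List.pairwise_cons.mp h with ⟨h1, h2⟩
    cases hx : PySem.Str.isIn x ql with
    | true =>
      simp only [pvLoopA, hx, if_true, pvPick, pvAtom_pos (P := fun p => PySem.Str.isIn p ql) hx]
      cases hp : pvPick (fun p => PySem.Str.isIn p ql) m' with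
      | none => rw [pvComb_none_right]
      | some b =>
        have hb := h1 b (pvPick_mem _ _ _ hp)
        rw [pvComb_some_some, if_neg (by omega)]
    | false =>
      simp only [pvLoopA, hx, if_false, Bool.false_eq_true, pvPick,
        pvAtom_neg (P := fun p => PySem.Str.isIn p ql) hx, pvComb_none_left, ih h2]

theorem pvSorted_eq : PySem.List.sorted pvKeywords PySem.Str.len true = pvSort pvKeywords := by
  decide

theorem pvSort_pairwise :
    (pvSort pvKeywords).Pairwise (fun a b => PySem.Str.len b ≤ PySem.Str.len a) := by
  decide

theorem pvPhase1 (ql : String) :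
    pvLoopA (PySem.List.sorted pvKeywords PySem.Str.len true) ql = pvLoopB pvKeywords ql none := by
  rw [pvSorted_eq, pvLoopA_eq_pick ql _ pvSort_pairwise, pvPick_sort, pvLoopB_eq,
    pvComb_none_left]

theorem pvPhase2 (words : List String) :
    ∀ (suf : List String) (i : Nat), words.drop i = suf →
      pvLoopA2 words (PySem.List.enumerate suf (i : Int)) = pvLoopB2 suf := by
  intro suf
  induction suf with
  | nil => intro i _; rfl
  | cons w suf' ih =>
    intro i h
    have hdrop : words.drop (i + 1) = suf' := by
      rw [← List.tail_drop, h, List.tail_cons]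
    have hi : i < words.length := by
      by_contra hc
      rw [List.drop_eq_nil_of_le (by omega)] at h
      exact List.cons_ne_nil _ _ h.symm
    have hlen : words.length = i + 1 + suf'.length := by
      have h1 : (words.drop i).length = words.length - i := List.length_drop ..
      rw [h] at h1
      simp at h1
      omega
    have hcast : (i : Int) + 1 = ((i + 1 : Nat) : Int) := by push_cast; ring
    simp only [PySem.List.enumerate, pvLoopA2, pvLoopB2]
    cases hw : (["of", "for"] : List String).contains (PySem.Str.lower w) with
    | false =>
      simp only [Bool.false_and, Bool.false_eq_true, if_false, hcast]
      exact ih (i + 1) hdrop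
    | true =>
      simp only [Bool.true_and, if_true]
      cases suf' with
      | nil =>
        have hnl : ¬((i : Int) + 1 < (words.length : Int)) := by
          simp at hlen ⊢; omega
        rw [if_neg hnl, hcast]
        exact ih (i + 1) hdrop
      | cons w2 suf'' =>
        have hlt : (i : Int) + 1 < (words.length : Int) := by
          simp only [List.length_cons] at hlen
          omega
        rw [if_pos hlt]
        have hslice :
            PySem.List.slice words (some ((i : Int) + 1))
              (some (min ((i : Int) + 4) (words.length : Int)))
            = (w2 :: suf'').take 3 := by
          rw [PySem.List.slice_toNat words (by omega) (by omega)]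
          have h1 : ((i : Int) + 1).toNat = i + 1 := by omega
          have h2 : (min ((i : Int) + 4) ((words.length : Nat) : Int)).toNat
              = min (i + 4) words.length := by omega
          rw [h1, h2, hdrop]
          rcases Nat.lt_or_ge words.length (i + 4) with hgt | hle
          · have hs3 : (w2 :: suf'').length ≤ 3 := by
              simp only [List.length_cons] at hlen ⊢; omega
            have heq : min (i + 4) words.length - (i + 1) = (w2 :: suf'').length := by
              simp only [List.length_cons] at hlen ⊢; omega
            rw [heq, List.take_length, List.take_of_length_le hs3]
          · have heq : min (i + 4) words.length - (i + 1) = 3 := by omega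
            rw [heq]
        rw [hslice]
        cases hpw : ((w2 :: suf'').take 3
            |>.filter (fun v => !(pvStop.contains (PySem.Str.lower v)))).isEmpty with
        | true =>
          rw [hcast]
          exact ih (i + 1) hdrop
        | false => rfl

-- ===== VERDICT (by name: the statement is the Claim_ definition above) =====
theorem extract_product_py_spec : Claim_equal_extract_product_py := by
  intro query _
  unfold Spec_extract_product_py extract_product_py extract_product_py_alt
  simp only [pvPhase1]
  cases pvLoopB pvKeywords (PySem.Str.lower query) none with
  | some p => rfl
  | none =>
    have h := pvPhase2 (PySem.Str.split₀ query) (PySem.Str.split₀ query) 0 (by simp)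
    simp only [Nat.cast_zero] at h
    simp only [h]
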